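-- pv_equiv track=rewrite | github.com/bKolisnik/AoC2022 | Day 8/Treetop.py | set_boundaries_visible
-- ===== SOURCE A (Python) =====
-- def set_boundaries_visible(visible):
--     #edge trees are always visible
--     for j in range(len(visible[0])):
--         visible[0][j] = True
--         visible[len(visible)-1][j] = True
--
--     for i in range(len(visible)):
--         visible[i][0] = True
--         visible[i][len(visible[0])-1] = True
--     return visible
-- ===== SOURCE B (Python) =====
-- def set_boundaries_visible(visible):
--     # single full-grid sweep with a boundary predicate instead of two edge-only passes
--     rows = len(visible)
--     cols = len(visible[0])
--     for i in range(rows):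
--         for j in range(cols):
--             if i == 0 or i == rows - 1 or j == 0 or j == cols - 1:
--                 visible[i][j] = True
--     return visible
-- ===== Notes on version B (the rewrite author's own statement) =====
-- stated objective: simpler
-- what changed: A's two separate edge-only passes (one over columns touching the top and bottom rows, one over rows touching the left and right columns) are replaced by a single nested sweep over the whole grid that sets a cell whenever a boundary predicate on its indices holds.
import Mathlib
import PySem

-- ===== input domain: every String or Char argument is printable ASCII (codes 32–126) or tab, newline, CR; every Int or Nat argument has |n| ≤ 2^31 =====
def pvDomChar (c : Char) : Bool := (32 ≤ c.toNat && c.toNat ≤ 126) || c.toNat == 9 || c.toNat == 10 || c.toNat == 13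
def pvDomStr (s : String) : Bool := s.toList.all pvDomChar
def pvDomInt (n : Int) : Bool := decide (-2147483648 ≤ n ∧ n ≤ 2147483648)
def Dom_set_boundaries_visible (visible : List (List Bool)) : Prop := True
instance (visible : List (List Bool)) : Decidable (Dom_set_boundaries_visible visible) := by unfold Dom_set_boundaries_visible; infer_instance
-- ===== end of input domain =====

-- B replaces A's two edge-only passes by one full-grid sweep with a boundary predicate (objective: simpler).
-- Both Pythons mutate the argument in place; they perform the identical mutation, and the theorems are about the return value.

-- `visible[i][j] = True`: in-place assignment of one cell. Under Pre_ every index used is in range,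
-- where List.set is exact; out of range Python raises (excluded by Pre_) while List.set is a no-op.
def pySet2 (g : List (List Bool)) (i j : Nat) (b : Bool) : List (List Bool) :=
  g.set i ((g.getD i []).set j b)

-- ===== PORT A =====
def set_boundaries_visible (visible : List (List Bool)) : List (List Bool) :=
  -- for j in range(len(visible[0])): visible[0][j] = True; visible[len(visible)-1][j] = True
  let v1 := (List.range (visible.headD []).length).foldl
    (fun g j =>
      let g1 := pySet2 g 0 j true
      pySet2 g1 (g1.length - 1) j true) visible
  -- for i in range(len(visible)): visible[i][0] = True; visible[i][len(visible[0])-1] = True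
  (List.range v1.length).foldl
    (fun g i =>
      let g1 := pySet2 g i 0 true
      pySet2 g1 i ((g1.headD []).length - 1) true) v1

-- ===== PORT B =====
def set_boundaries_visible_alt (visible : List (List Bool)) : List (List Bool) :=
  let rows := visible.length
  let cols := (visible.headD []).length
  (List.range rows).foldl
    (fun g i =>
      (List.range cols).foldl
        (fun g j =>
          if i == 0 || i == rows - 1 || j == 0 || j == cols - 1 then pySet2 g i j true else g) g)
    visible

-- ===== PRECONDITION & SPEC =====
-- Exactly the inputs on which Python A returns (no exception): a nonempty grid whose first row is
-- nonempty and every row is at least as long as the first (A indexes every row up to len(visible[0])-1).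
def Pre_set_boundaries_visible (visible : List (List Bool)) : Prop :=
  visible ≠ [] ∧ 1 ≤ (visible.headD []).length ∧
    ∀ row ∈ visible, (visible.headD []).length ≤ row.length
instance (visible : List (List Bool)) : Decidable (Pre_set_boundaries_visible visible) := by
  unfold Pre_set_boundaries_visible; infer_instance

def pvWitness_set_boundaries_visible : List (List Bool) :=
  [[false, false, false], [false, false, false], [false, false, false]]

def Spec_set_boundaries_visible (visible : List (List Bool)) (out : List (List Bool)) : Prop :=
  out = set_boundaries_visible_alt visible
instance (visible : List (List Bool)) (out : List (List Bool)) : Decidable (Spec_set_boundaries_visible visible out) := by unfold Spec_set_boundaries_visible; infer_instance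

-- ===== CLAIM (what is proved, stated in full; the proofs are below) =====
def Claim_equal_set_boundaries_visible : Prop := ∀ (visible : List (List Bool)), Dom_set_boundaries_visible visible → Pre_set_boundaries_visible visible → Spec_set_boundaries_visible visible (set_boundaries_visible visible)

-- ===== LEMMAS AND PROOFS =====

-- the value of one cell (default false out of range)
def cell (g : List (List Bool)) (i j : Nat) : Bool := (g.getD i []).getD j false

-- the row-length profile of a grid
def shape (g : List (List Bool)) : List Nat := g.map List.length

-- fold that sets a list of cells to true
def setAll (g : List (List Bool)) (ps : List (Nat × Nat)) : List (List Bool) :=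
  ps.foldl (fun g p => pySet2 g p.1 p.2 true) g

theorem length_pySet2 (g : List (List Bool)) (i j : Nat) (b : Bool) :
    (pySet2 g i j b).length = g.length := by
  simp [pySet2]

theorem getD_length_pySet2 (g : List (List Bool)) (i j : Nat) (b : Bool) (k : Nat) :
    ((pySet2 g i j b).getD k []).length = (g.getD k []).length := by
  unfold pySet2
  by_cases h : i = k
  · subst h
    by_cases hi : i < g.length
    · simp [List.getD, hi]
    · simp [List.getD, List.set_eq_of_length_le (by omega : g.length ≤ i)]
  · simp [List.getD, List.getElem?_set_ne h]

theorem shape_pySet2 (g : List (List Bool)) (i j : Nat) (b : Bool) :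
    shape (pySet2 g i j b) = shape g := by
  unfold shape pySet2
  apply List.ext_getElem (by simp)
  intro k h1 h2
  simp [List.getElem_set]
  intro hk; subst hk
  simp at h2
  simp [List.getElem?_eq_getElem h2]

theorem cell_pySet2 (g : List (List Bool)) (i j : Nat) (b : Bool) (i' j' : Nat) :
    cell (pySet2 g i j b) i' j' =
      if i' = i ∧ j' = j ∧ i < g.length ∧ j < (g.getD i []).length then b
      else cell g i' j' := by
  unfold cell pySet2
  by_cases h : i' = i
  · subst h
    by_cases hi : i' < g.length
    · have hrow : g.getD i' [] = g[i'] := List.getD_eq_getElem g [] hi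
      simp only [List.getD, List.getElem?_set_self hi, List.getElem?_eq_getElem hi,
        Option.getD_some]
      split_ifs with hc
      · simp_all
      · by_cases hj : j' = j
        · subst hj
          have hlen : g[i'].length ≤ j' := by simp [hi] at hc; omega
          rw [List.set_eq_of_length_le hlen]
        · rw [List.getElem?_set_ne (by omega : j ≠ j')]
    · simp [List.set_eq_of_length_le (by omega : g.length ≤ i'), hi]
  · simp [List.getD, List.getElem?_set_ne (by omega : i ≠ i'), h]

theorem shape_setAll (g : List (List Bool)) (ps : List (Nat × Nat)) :
    shape (setAll g ps) = shape g := by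
  induction ps generalizing g with
  | nil => rfl
  | cons p ps ih => simp [setAll, List.foldl_cons] at *; rw [ih, shape_pySet2]

theorem cell_setAll (g : List (List Bool)) (ps : List (Nat × Nat)) (i j : Nat) :
    cell (setAll g ps) i j =
      if (i, j) ∈ ps ∧ i < g.length ∧ j < (g.getD i []).length then true
      else cell g i j := by
  induction ps generalizing g with
  | nil => simp [setAll]
  | cons p ps ih =>
    obtain ⟨a, c⟩ := p
    show cell (setAll (pySet2 g a c true) ps) i j = _
    rw [ih, length_pySet2, getD_length_pySet2, cell_pySet2]
    by_cases h3 : i = a ∧ j = c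
    · obtain ⟨rfl, rfl⟩ := h3
      simp only [List.mem_cons]
      split_ifs <;> tauto
    · simp only [List.mem_cons, Prod.mk.injEq]
      split_ifs <;> tauto

theorem setAll_append (g : List (List Bool)) (l1 l2 : List (Nat × Nat)) :
    setAll g (l1 ++ l2) = setAll (setAll g l1) l2 := List.foldl_append

theorem length_setAll (g : List (List Bool)) (ps : List (Nat × Nat)) :
    (setAll g ps).length = g.length := by
  have := congrArg List.length (shape_setAll g ps)
  simpa [shape] using this

theorem getD_length_setAll (g : List (List Bool)) (ps : List (Nat × Nat)) (k : Nat) :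
    ((setAll g ps).getD k []).length = (g.getD k []).length := by
  induction ps generalizing g with
  | nil => rfl
  | cons p ps ih =>
    show ((setAll (pySet2 g p.1 p.2 true) ps).getD k []).length = _
    rw [ih, getD_length_pySet2]

theorem headD_eq_getD_zero (l : List (List Bool)) : l.headD [] = l.getD 0 [] := by
  cases l <;> rfl

theorem grid_ext (g1 g2 : List (List Bool)) (hs : shape g1 = shape g2)
    (hc : ∀ i j, cell g1 i j = cell g2 i j) : g1 = g2 := by
  have hlen : g1.length = g2.length := by
    have := congrArg List.length hs
    simpa [shape] using this
  apply List.ext_getElem hlen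
  intro i h1 h2
  have hrl : g1[i].length = g2[i].length := by
    have := congrArg (fun l => l.getD i 0) hs
    simpa [shape, List.getD_eq_getElem, h1, h2] using this
  apply List.ext_getElem hrl
  intro j hj1 hj2
  have := hc i j
  simpa [cell, List.getD_eq_getElem, h1, h2, hj1, hj2] using this

-- A's first loop as setAll
theorem loopA1 (js : List Nat) (g : List (List Bool)) (n : Nat) (hn : g.length = n) :
    js.foldl (fun g j => let g1 := pySet2 g 0 j true; pySet2 g1 (g1.length - 1) j true) g
      = setAll g (js.flatMap fun j => [(0, j), (n - 1, j)]) := by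
  induction js generalizing g with
  | nil => rfl
  | cons j js ih =>
    rw [List.foldl_cons, List.flatMap_cons,
      ih _ (by simp [length_pySet2, hn]), setAll_append]
    congr 1
    simp [setAll, length_pySet2, hn]

-- A's second loop as setAll
theorem loopA2 (is : List Nat) (g : List (List Bool)) (m : Nat) (hm : (g.getD 0 []).length = m) :
    is.foldl (fun g i => let g1 := pySet2 g i 0 true; pySet2 g1 i ((g1.headD []).length - 1) true) g
      = setAll g (is.flatMap fun i => [(i, 0), (i, m - 1)]) := by
  induction is generalizing g with
  | nil => rfl
  | cons i is ih =>
    rw [List.foldl_cons, List.flatMap_cons,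
      ih _ (by rw [getD_length_pySet2, getD_length_pySet2]; exact hm), setAll_append]
    congr 1
    show pySet2 (pySet2 g i 0 true) i (((pySet2 g i 0 true).headD []).length - 1) true
        = setAll g [(i, 0), (i, m - 1)]
    rw [headD_eq_getD_zero, getD_length_pySet2, hm]
    rfl

-- B's inner loop as setAll
theorem loopB_inner (i rows cols : Nat) (js : List Nat) (g : List (List Bool)) :
    js.foldl (fun g j => if i == 0 || i == rows - 1 || j == 0 || j == cols - 1 then pySet2 g i j true else g) g
      = setAll g ((js.filter (fun j => i == 0 || i == rows - 1 || j == 0 || j == cols - 1)).map (fun j => (i, j))) := by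
  induction js generalizing g with
  | nil => rfl
  | cons j js ih =>
    rw [List.foldl_cons, List.filter_cons]
    by_cases hc : (i == 0 || i == rows - 1 || j == 0 || j == cols - 1) = true
    · rw [if_pos hc, hc, if_pos rfl, List.map_cons]
      exact ih (pySet2 g i j true)
    · simp only [if_neg hc]
      exact ih g

-- B's outer loop as setAll
theorem loopB_outer (f : Nat → List (Nat × Nat)) (is : List Nat) (g : List (List Bool)) :
    is.foldl (fun g i => setAll g (f i)) g = setAll g (is.flatMap f) := by
  induction is generalizing g with
  | nil => rfl
  | cons i is ih => rw [List.foldl_cons, List.flatMap_cons, setAll_append, ih]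

-- ===== VERDICT (by name: the statement is the Claim_ definition above) =====
theorem set_boundaries_visible_spec : Claim_equal_set_boundaries_visible := by
  intro v _ hpre
  obtain ⟨hne, hm1, hrows⟩ := hpre
  unfold Spec_set_boundaries_visible set_boundaries_visible set_boundaries_visible_alt
  dsimp only
  rw [loopA1 (List.range (v.headD []).length) v v.length rfl, length_setAll,
    loopA2 (List.range v.length) _ (v.headD []).length
      (by rw [getD_length_setAll, ← headD_eq_getD_zero]),
    ← setAll_append]
  have hb : (fun (g : List (List Bool)) (i : Nat) =>
        (List.range (v.headD []).length).foldl
          (fun g j => if i == 0 || i == v.length - 1 || j == 0 || j == (v.headD []).length - 1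
            then pySet2 g i j true else g) g)
      = fun g i => setAll g (((List.range (v.headD []).length).filter
          (fun j => i == 0 || i == v.length - 1 || j == 0 || j == (v.headD []).length - 1)).map
          (fun j => (i, j))) := by
    funext g i
    exact loopB_inner i v.length (v.headD []).length _ g
  rw [hb, loopB_outer]
  apply grid_ext _ _ (by rw [shape_setAll, shape_setAll])
  intro i j
  rw [cell_setAll, cell_setAll]
  by_cases hi : i < v.length
  · have hRi : (v.headD []).length ≤ (v.getD i []).length := by
      rw [List.getD_eq_getElem v [] hi]
      exact hrows _ (List.getElem_mem hi)
    apply if_congr _ rfl rfl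
    simp only [List.mem_append, List.mem_flatMap, List.mem_range, List.mem_cons, List.mem_map,
      List.mem_filter, List.not_mem_nil, or_false, Prod.mk.injEq, beq_iff_eq, Bool.or_eq_true]
    constructor
    · rintro ⟨h, hbnd⟩
      refine ⟨⟨i, hi, j, ⟨?_, ?_⟩, rfl, rfl⟩, hbnd⟩ <;>
        rcases h with ⟨a, ha, hc | hc⟩ | ⟨a, ha, hc | hc⟩ <;> omega
    · rintro ⟨⟨i', hi', j', ⟨hj', hcond⟩, rfl, rfl⟩, hbnd⟩
      refine ⟨?_, hbnd⟩
      rcases hcond with ((h0 | h0) | h0) | h0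
      · exact Or.inl ⟨j', hj', Or.inl ⟨h0, rfl⟩⟩
      · exact Or.inl ⟨j', hj', Or.inr ⟨h0, rfl⟩⟩
      · exact Or.inr ⟨i', hi', Or.inl ⟨rfl, h0⟩⟩
      · exact Or.inr ⟨i', hi', Or.inr ⟨rfl, h0⟩⟩
  · simp [hi]
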